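-- pv_equiv track=rewrite | github.com/hanshnnn/FFC-coding-exercise | Algorithms/No Repeats Please/solution.py | perm_alone
-- ===== SOURCE A (Python) =====
-- def perm_alone(combinations):
--     no_repeat = 1
--     count = 0
--     for combination in combinations:
--         for i in range(len(combination)-1):
--             if combination[i] == combination[i+1]:
--                 no_repeat = 0
--                 break
--         if no_repeat:
--             count += 1
--         no_repeat = 1
--     return count
-- ===== SOURCE B (Python) =====
-- def perm_alone(combinations):
--     count = 0
--     for s in combinations:
--         if not any(c + c in s for c in set(s)):
--             count += 1
--     return count
-- ===== Notes on version B (the rewrite author's own statement) =====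
-- stated objective: alternative
-- what changed: B decides each string by substring search: it rejects a string iff some doubled character c*2 (for c over the string's distinct characters) occurs as a substring, instead of A's index-based adjacent-pair scan with break.
import Mathlib
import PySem

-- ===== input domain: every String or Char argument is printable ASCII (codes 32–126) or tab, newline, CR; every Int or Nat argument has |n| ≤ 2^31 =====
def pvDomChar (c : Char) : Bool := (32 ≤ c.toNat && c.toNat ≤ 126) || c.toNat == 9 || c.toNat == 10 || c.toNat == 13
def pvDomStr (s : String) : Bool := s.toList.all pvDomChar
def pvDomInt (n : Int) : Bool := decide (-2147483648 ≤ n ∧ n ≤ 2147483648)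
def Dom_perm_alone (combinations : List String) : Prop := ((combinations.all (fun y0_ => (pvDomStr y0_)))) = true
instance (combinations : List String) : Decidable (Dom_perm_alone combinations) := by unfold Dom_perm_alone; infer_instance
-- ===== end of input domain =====

-- B rejects a string iff some doubled character c*2 occurs as a substring (search over the
-- string's distinct characters), instead of A's index-based adjacent-pair scan: objective 'alternative'.


-- ===== PORT A =====
-- inner loop 'for i in range(len(combination)-1): if combination[i] == combination[i+1]: no_repeat = 0; break'
-- returns the final value of no_repeat (1, or 0 on break)
def pvAInner (s : List Char) : List Int → Int
  | [] => 1
  | i :: rest =>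
      if PySem.List.pyGet? s i = PySem.List.pyGet? s (i + 1) then 0
      else pvAInner s rest

def perm_alone (combinations : List String) : Int :=
  combinations.foldl
    (fun count combination =>
      let no_repeat := pvAInner combination.toList
        (PySem.List.pyRange 0 ((combination.toList.length : Int) - 1) 1)
      if no_repeat ≠ 0 then count + 1 else count)
    0

-- ===== PORT B =====
-- 'any(c + c in s for c in set(s))' of Source B: substring search for each doubled distinct character
def pvBHasDouble (s : List Char) : Bool :=
  (PySem.Set.ofList s).any (fun c => PySem.Chars.isIn [c, c] s)

def perm_alone_alt (combinations : List String) : Int :=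
  combinations.foldl
    (fun count s => if ¬ pvBHasDouble s.toList then count + 1 else count)
    0

-- ===== PRECONDITION & SPEC =====
def Spec_perm_alone (combinations : List String) (out : Int) : Prop := out = perm_alone_alt combinations
instance (combinations : List String) (out : Int) : Decidable (Spec_perm_alone combinations out) := by unfold Spec_perm_alone; infer_instance

-- ===== CLAIM (what is proved, stated in full; the proofs are below) =====
def Claim_equal_perm_alone : Prop := ∀ (combinations : List String), Dom_perm_alone combinations → Spec_perm_alone combinations (perm_alone combinations)

-- ===== LEMMAS AND PROOFS =====

-- "no two adjacent characters are equal", the common characterisation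
def pvNoAdj : List Char → Bool
  | [] => true
  | [_] => true
  | a :: b :: t => a ≠ b && pvNoAdj (b :: t)

theorem pvAInner_eq : ∀ (n : Nat) (s : List Char) (k : Nat), s.length - k ≤ n →
    pvAInner s (PySem.List.pyRange (k : Int) ((s.length : Int) - 1) 1) =
      (if pvNoAdj (s.drop k) then 1 else 0) := by
  intro n
  induction n with
  | zero =>
      intro s k hk
      have hk' : s.length ≤ k := by omega
      rw [PySem.List.pyRange_one_eq_nil (by omega)]
      rw [List.drop_of_length_le hk']
      simp [pvAInner, pvNoAdj]
  | succ m ih =>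
      intro s k hk
      by_cases hlt : (k : Int) < (s.length : Int) - 1
      · have hk1 : k + 1 < s.length := by omega
        have hk0 : k < s.length := by omega
        rw [PySem.List.pyRange_one_cons hlt]
        simp only [pvAInner]
        have hg0 : PySem.List.pyGet? s (k : Int) = some s[k] :=
          PySem.List.pyGet?_ofNat s k hk0
        have hg1 : PySem.List.pyGet? s ((k : Int) + 1) = some s[k+1] := by
          have := PySem.List.pyGet?_ofNat s (k+1) hk1
          push_cast at this ⊢
          exact this
        rw [hg0, hg1]
        have hdrop : s.drop k = s[k] :: s.drop (k + 1) :=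
          List.drop_eq_getElem_cons hk0
        have hdrop1 : s.drop (k + 1) = s[k+1] :: s.drop (k + 2) :=
          List.drop_eq_getElem_cons hk1
        by_cases heq : s[k] = s[k+1]
        · rw [if_pos (by rw [heq])]
          rw [hdrop, hdrop1, heq]
          simp [pvNoAdj]
        · rw [if_neg (by simpa using heq)]
          have ihk := ih s (k + 1) (by omega)
          push_cast at ihk ⊢
          rw [ihk]
          rw [hdrop, hdrop1]
          simp only [pvNoAdj, ← hdrop1]
          simp [heq]
      · rw [PySem.List.pyRange_one_eq_nil (by omega)]
        have : s.length ≤ k + 1 := by omega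
        simp only [pvAInner]
        rcases Nat.lt_or_ge k s.length with h | h
        · have hk' : k = s.length - 1 := by omega
          have hlen : (s.drop k).length = 1 := by rw [List.length_drop]; omega
          rcases hd : s.drop k with _ | ⟨a, _ | ⟨b, t⟩⟩
          · simp [pvNoAdj]
          · simp [pvNoAdj]
          · rw [hd] at hlen; simp at hlen
        · rw [List.drop_of_length_le h]; simp [pvNoAdj]

theorem pvAInner_top (s : List Char) :
    pvAInner s (PySem.List.pyRange 0 ((s.length : Int) - 1) 1) =
      (if pvNoAdj s then 1 else 0) := by
  have := pvAInner_eq s.length s 0 (by omega)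
  simpa using this

-- a doubled character anywhere forces an adjacent equal pair
theorem pvNoAdj_append_double : ∀ (pre : List Char) (c : Char) (suf : List Char),
    pvNoAdj (pre ++ c :: c :: suf) = false := by
  intro pre
  induction pre with
  | nil => intro c suf; simp [pvNoAdj]
  | cons a t ih =>
      intro c suf
      cases ht : t ++ c :: c :: suf with
      | nil => cases t <;> simp at ht
      | cons x r =>
          have : pvNoAdj (t ++ c :: c :: suf) = false := ih c suf
          rw [ht] at this
          simp only [List.cons_append, ht, pvNoAdj, this, Bool.and_false]

-- an adjacent equal pair is exactly an infix [c, c]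
theorem pvNoAdj_false_iff (l : List Char) :
    pvNoAdj l = false ↔ ∃ c, [c, c] <:+: l := by
  constructor
  · intro h
    induction l with
    | nil => simp [pvNoAdj] at h
    | cons a t ih =>
        cases t with
        | nil => simp [pvNoAdj] at h
        | cons b r =>
            simp only [pvNoAdj, Bool.and_eq_false_iff] at h
            by_cases hab : a = b
            · exact ⟨a, ⟨[], r, by simp [hab]⟩⟩
            · have hbt : pvNoAdj (b :: r) = false := by
                rcases h with h | h
                · simp [hab] at h
                · exact h
              obtain ⟨c, hc⟩ := ih hbt
              exact ⟨c, hc.trans (List.suffix_cons a (b :: r)).isInfix⟩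
  · rintro ⟨c, pre, suf, rfl⟩
    simpa using pvNoAdj_append_double pre c suf

theorem pvBHasDouble_iff (l : List Char) :
    pvBHasDouble l = true ↔ pvNoAdj l = false := by
  rw [pvBHasDouble, List.any_eq_true, pvNoAdj_false_iff]
  constructor
  · rintro ⟨c, _, hin⟩
    exact ⟨c, (PySem.Chars.isIn_iff_infix _ _).mp hin⟩
  · rintro ⟨c, hinf⟩
    refine ⟨c, ?_, (PySem.Chars.isIn_iff_infix _ _).mpr hinf⟩
    exact (PySem.Set.mem_ofList _ _).mpr (hinf.subset (by simp))

theorem perm_alone_fold_eq : ∀ (combinations : List String) (count : Int),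
    combinations.foldl
      (fun count combination =>
        let no_repeat := pvAInner combination.toList
          (PySem.List.pyRange 0 ((combination.toList.length : Int) - 1) 1)
        if no_repeat ≠ 0 then count + 1 else count) count =
    combinations.foldl
      (fun count s => if ¬ pvBHasDouble s.toList then count + 1 else count) count := by
  intro combinations
  induction combinations with
  | nil => intro count; rfl
  | cons s t ih =>
      intro count
      simp only [List.foldl_cons]
      rw [pvAInner_top s.toList]
      by_cases h : pvNoAdj s.toList = true
      · rw [if_pos (by simp [h])]
        have hb : pvBHasDouble s.toList = false := by
          rcases hbd : pvBHasDouble s.toList with _ | _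
          · rfl
          · rw [(pvBHasDouble_iff _).mp hbd] at h; simp at h
        rw [if_pos (by simp [hb])]
        exact ih _
      · have h' : pvNoAdj s.toList = false := by
          rcases hx : pvNoAdj s.toList with _ | _
          · rfl
          · exact absurd hx h
        rw [if_neg (by simp [h'])]
        rw [if_neg (by simp [(pvBHasDouble_iff _).mpr h'])]
        exact ih _

-- ===== VERDICT (by name: the statement is the Claim_ definition above) =====
theorem perm_alone_spec : Claim_equal_perm_alone := by
  intro combinations _
  unfold Spec_perm_alone perm_alone perm_alone_alt
  exact perm_alone_fold_eq combinations 0
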